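-- pv_equiv track=rewrite | github.com/AkshatTripathi77/newpygit | listFun2.py | count
-- ===== SOURCE A (Python) =====
-- def count(lst):
--     more = 0
--     less = 0
--     for i in range(len(lst)):
--         if len(lst[i]) > 5:
--             more += 1
--         else:
--             less += 1
--
--     return more,less
-- ===== SOURCE B (Python) =====
-- def count(lst):
--     lengths = sorted(len(x) for x in lst)
--     lo, hi = 0, len(lengths)
--     while lo < hi:
--         mid = (lo + hi) // 2
--         if lengths[mid] > 5:
--             hi = mid
--         else:
--             lo = mid + 1
--     return len(lengths) - lo, lo
-- ===== Notes on version B (the rewrite author's own statement) =====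
-- stated objective: alternative
-- what changed: B sorts the element lengths and binary-searches for the partition point between lengths <=5 and >5, instead of A's single index loop with two running counters; the pair is read off from the partition index.
import Mathlib
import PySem

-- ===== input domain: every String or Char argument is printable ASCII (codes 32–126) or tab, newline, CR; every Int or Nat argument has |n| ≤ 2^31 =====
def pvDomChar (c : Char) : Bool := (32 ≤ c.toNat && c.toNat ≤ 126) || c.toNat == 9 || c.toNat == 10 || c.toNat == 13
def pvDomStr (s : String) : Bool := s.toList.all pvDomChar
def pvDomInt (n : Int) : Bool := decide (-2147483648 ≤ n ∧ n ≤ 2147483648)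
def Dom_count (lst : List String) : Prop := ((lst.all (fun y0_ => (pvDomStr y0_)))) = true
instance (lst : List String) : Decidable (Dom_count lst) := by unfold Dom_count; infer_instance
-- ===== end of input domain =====

-- B sorts the lengths and binary-searches for the >5 partition point instead of looping with two counters (alternative algorithm).

-- ===== PORT A =====
-- index loop over range(len(lst)) with two accumulators (more, less)
def count (lst : List String) : Int × Int :=
  (PySem.List.pyRange 0 (lst.length : Int) 1).foldl
    (fun (p : Int × Int) i =>
      if 5 < PySem.Str.len (PySem.List.pyGetD lst i "") then (p.1 + 1, p.2)
      else (p.1, p.2 + 1))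
    (0, 0)

-- ===== PORT B =====
-- the while lo < hi binary-search loop of Source B; lengths[mid] is in range whenever
-- 0 ≤ lo ≤ mid < hi ≤ len, so pyGetD with default 0 computes exactly Python's lengths[mid]
def bsearchB (L : List Int) (lo hi : Int) : Int :=
  if lo < hi then
    let mid := PySem.Int.floordiv (lo + hi) 2
    if 5 < PySem.List.pyGetD L mid 0 then bsearchB L lo mid
    else bsearchB L (mid + 1) hi
  else lo
termination_by (hi - lo).toNat
decreasing_by
  · have := PySem.Int.floordiv_two_mid_bounds (lo := lo) (hi := hi) (by omega)
    have h2 : PySem.Int.floordiv (lo + hi) 2 < hi := by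
      rw [PySem.Int.floordiv_lt_iff_lt_mul (by omega)]; omega
    omega
  · have := PySem.Int.floordiv_two_mid_bounds (lo := lo) (hi := hi) (by omega)
    omega

-- lengths = sorted(len(x) for x in lst); lo = binary-search partition; return (len - lo, lo)
def count_alt (lst : List String) : Int × Int :=
  let lengths := PySem.List.sorted (lst.map (fun x => PySem.Str.len x)) (fun v => v) false
  let lo := bsearchB lengths 0 (lengths.length : Int)
  ((lengths.length : Int) - lo, lo)

-- ===== PRECONDITION & SPEC =====
def Spec_count (lst : List String) (out : Int × Int) : Prop := out = count_alt lst
instance (lst : List String) (out : Int × Int) : Decidable (Spec_count lst out) := by unfold Spec_count; infer_instance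

-- ===== CLAIM =====
def Claim_equal_count : Prop := ∀ (lst : List String), Dom_count lst → Spec_count lst (count lst)

-- ===== LEMMAS AND PROOFS =====

-- A's fold computes (count of >5, count of ≤5)
theorem count_foldl_aux (lst : List String) (m l : Int) :
    lst.foldl
      (fun (p : Int × Int) s =>
        if 5 < PySem.Str.len s then (p.1 + 1, p.2) else (p.1, p.2 + 1))
      (m, l)
    = (m + (lst.countP (fun x => decide (5 < PySem.Str.len x)) : Int),
       l + ((lst.length : Int) - (lst.countP (fun x => decide (5 < PySem.Str.len x)) : Int))) := by
  induction lst generalizing m l with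
  | nil => simp
  | cons a t ih =>
    by_cases h : 5 < PySem.Str.len a
    · rw [List.foldl_cons, if_pos h, ih, List.countP_cons]
      simp only [h, decide_true, List.length_cons, Prod.mk.injEq]
      constructor <;> push_cast <;> ring
    · rw [List.foldl_cons, if_neg h, ih, List.countP_cons]
      simp only [h, decide_false, List.length_cons, Prod.mk.injEq]
      constructor <;> push_cast <;> ring

-- a list whose first k elements satisfy p and whose rest do not has countP p = k
theorem countP_eq_of_partition (L : List Int) (p : Int → Bool) (k : ℕ) (hk : k ≤ L.length)
    (h1 : ∀ (i : ℕ) (h : i < L.length), i < k → p L[i] = true)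
    (h2 : ∀ (i : ℕ) (h : i < L.length), k ≤ i → ¬ p L[i] = true) :
    L.countP p = k := by
  calc L.countP p = ((L.take k) ++ (L.drop k)).countP p := by rw [List.take_append_drop]
    _ = (L.take k).countP p + (L.drop k).countP p := List.countP_append ..
    _ = k := by
        have ht : (L.take k).countP p = (L.take k).length := by
          apply List.countP_eq_length.mpr
          intro x hx
          obtain ⟨i, hil, hix⟩ := List.mem_iff_getElem.mp hx
          have hil' : i < k := by
            have := List.length_take_le k L; omega
          rw [List.getElem_take] at hix
          rw [← hix]
          exact h1 i (by omega) hil'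
        have hd : (L.drop k).countP p = 0 := by
          apply List.countP_eq_zero.mpr
          intro x hx
          obtain ⟨i, hil, hix⟩ := List.mem_iff_getElem.mp hx
          rw [List.getElem_drop] at hix
          rw [← hix]
          exact h2 (k + i) (by simp [List.length_drop] at hil; omega) (by omega)
        rw [ht, hd, List.length_take]
        omega

-- the binary search on a sorted list, with the loop invariant, returns the ≤5-count
theorem bsearch_inv (L : List Int) (hs : L.Pairwise (· ≤ ·)) :
    ∀ (n : ℕ) (lo hi : Int), (hi - lo).toNat = n → 0 ≤ lo → lo ≤ hi → hi ≤ (L.length : Int) →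
    (∀ (i : ℕ) (h : i < L.length), (i : Int) < lo → L[i] ≤ 5) →
    (∀ (i : ℕ) (h : i < L.length), hi ≤ (i : Int) → 5 < L[i]) →
    bsearchB L lo hi = (L.countP (fun x => decide (x ≤ 5)) : Int) := by
  intro n
  induction n using Nat.strong_induction_on with
  | _ n ih =>
    intro lo hi hn h0 hlh hhl hpre hsuf
    rw [bsearchB]
    by_cases hlt : lo < hi
    · rw [if_pos hlt]
      have hmid := PySem.Int.floordiv_two_mid_bounds (lo := lo) (hi := hi) (by omega)
      have hmlt : PySem.Int.floordiv (lo + hi) 2 < hi := by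
        rw [PySem.Int.floordiv_lt_iff_lt_mul (by omega)]; omega
      set mid := PySem.Int.floordiv (lo + hi) 2 with hmdef
      have hmr : mid.toNat < L.length := by omega
      have hget : PySem.List.pyGetD L mid 0 = L[mid.toNat] :=
        PySem.List.pyGetD_eq_getElem (xs := L) (i := mid) (d := 0) (by omega) (by omega)
      have hpair := List.pairwise_iff_getElem.mp hs
      by_cases hb : 5 < PySem.List.pyGetD L mid 0
      · rw [if_pos hb]
        refine ih (mid - lo).toNat (by omega) lo mid rfl h0 (by omega) (by omega) hpre ?_
        intro i hi' hmi
        rcases eq_or_lt_of_le hmi with heq | hlt2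
        · have : i = mid.toNat := by omega
          subst this; rw [← hget]; exact hb
        · have := hpair mid.toNat i hmr hi' (by omega)
          rw [hget] at hb; omega
      · rw [if_neg hb]
        refine ih (hi - (mid + 1)).toNat (by omega) (mid + 1) hi rfl (by omega) (by omega) hhl ?_ hsuf
        intro i hi' him
        by_cases hlt2 : (i : Int) < mid
        · have := hpair i mid.toNat hi' hmr (by omega)
          rw [hget] at hb; omega
        · have : i = mid.toNat := by omega
          subst this; rw [← hget]; omega
    · rw [if_neg hlt]
      have hlo : lo = hi := by omega
      rw [countP_eq_of_partition L (fun x => decide (x ≤ 5)) lo.toNat (by omega)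
        (fun i h hik => by simpa using hpre i h (by omega))
        (fun i h hik => by simpa using hsuf i h (by omega))]
      omega

-- ===== VERDICT =====
theorem count_spec : Claim_equal_count := by
  intro lst _
  unfold Spec_count count count_alt
  rw [PySem.List.foldl_pyRange_zero_pyGetD' (f := fun (p : Int × Int) s =>
    if 5 < PySem.Str.len s then (p.1 + 1, p.2) else (p.1, p.2 + 1)) (d := "")]
  rw [count_foldl_aux]
  set M := lst.map (fun x => PySem.Str.len x) with hM
  set L := PySem.List.sorted M (fun v => v) false with hL
  have hsorted : L.Pairwise (· ≤ ·) := by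
    have := PySem.List.sorted_pairwise (xs := M) (key := fun v => v)
    simpa using this
  have hperm : L.Perm M := PySem.List.sorted_perm ..
  have hlen : L.length = M.length := hperm.length_eq
  have hbs : bsearchB L 0 (L.length : Int) = (L.countP (fun x => decide (x ≤ 5)) : Int) := by
    refine bsearch_inv L hsorted ((L.length : Int) - 0).toNat 0 (L.length : Int) rfl le_rfl
      (by positivity) le_rfl (fun i h hik => by omega) (fun i h hik => by exfalso; omega)
  have hcle : L.countP (fun x => decide (x ≤ 5)) = lst.countP (fun x => decide (PySem.Str.len x ≤ 5)) := by
    rw [hperm.countP_eq, hM, List.countP_map]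
    rfl
  have hsum : lst.length = lst.countP (fun x => decide (5 < PySem.Str.len x))
      + lst.countP (fun x => decide (PySem.Str.len x ≤ 5)) := by
    rw [List.length_eq_countP_add_countP (fun x => decide (5 < PySem.Str.len x))]
    congr 1
    apply List.countP_congr
    intro x _
    simp [not_lt]
  have hMlen : M.length = lst.length := by rw [hM, List.length_map]
  simp only [hbs, hcle]
  have h1 : lst.countP (fun x => decide (5 < PySem.Str.len x)) ≤ lst.length := List.countP_le_length ..
  simp only [Prod.mk.injEq]
  constructor <;> omega
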